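-- pv_equiv track=rewrite | github.com/junhyukkk/junhyuk | 08.24/live.py | find_deadlocks
-- ===== SOURCE A (Python) =====
-- def find_deadlocks(N, arr):
--     deadlocks = 0
--
--     for j in range(N):
--         is_blue_in_column = False  # 푸른 자성체가 현재 열에 있는지 여부
--         for i in range(N):
--             if arr[i][j] == 1:  # 현재 위치에 푸른 자성체가 있는 경우
--                 if is_blue_in_column:  # 이미 이 열에 푸른 자성체가 있으면 교착 상태
--                     deadlocks += 1
--                 else:
--                     is_blue_in_column = True
--             elif arr[i][j] == 2:  # 현재 위치에 빨간 자성체가 있는 경우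
--                 is_blue_in_column = False  # 푸른 자성체가 아래로 이동하면 빨간 자성체는 영향을 받지 않음
--
--     return deadlocks
-- ===== SOURCE B (Python) =====
-- def find_deadlocks(N, arr):
--     total = 0
--     for j in range(N):
--         col = [arr[i][j] for i in range(N) if arr[i][j] in (1, 2)]
--         total += sum(1 for a, b in zip(col, col[1:]) if a == 1 and b == 1)
--     return total
-- ===== Notes on version B (the rewrite author's own statement) =====
-- stated objective: simpler
-- what changed: Replaces the threaded is_blue flag/state machine with a per-column filtered list of magnet cells (values 1 or 2) and a counting of adjacent (1,1) pairs in it.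
import Mathlib
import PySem

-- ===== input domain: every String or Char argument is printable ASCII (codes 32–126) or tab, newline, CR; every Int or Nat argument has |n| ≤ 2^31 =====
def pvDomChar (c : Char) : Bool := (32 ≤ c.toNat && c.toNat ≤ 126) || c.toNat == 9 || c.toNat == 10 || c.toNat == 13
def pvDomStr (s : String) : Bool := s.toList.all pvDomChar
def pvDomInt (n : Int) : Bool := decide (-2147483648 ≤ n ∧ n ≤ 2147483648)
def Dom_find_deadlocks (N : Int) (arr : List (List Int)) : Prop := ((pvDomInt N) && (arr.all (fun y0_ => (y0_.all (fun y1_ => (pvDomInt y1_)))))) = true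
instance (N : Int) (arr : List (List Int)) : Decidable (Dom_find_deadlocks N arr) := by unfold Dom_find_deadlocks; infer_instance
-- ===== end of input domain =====

-- B replaces A's threaded is_blue flag with a per-column filtered list of magnet cells and a
-- count of adjacent (1,1) pairs in it (objective: simpler decomposition, same O(N^2) cost).

-- ===== PORT A =====
def find_deadlocks (N : Int) (arr : List (List Int)) : Int :=
  (PySem.List.pyRange 0 N 1).foldl (fun deadlocks j =>
    ((PySem.List.pyRange 0 N 1).foldl
      (fun (st : Bool × Int) i =>
        if PySem.List.pyGetD (PySem.List.pyGetD arr i []) j 0 = 1 then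
          (if st.1 then (true, st.2 + 1) else (true, st.2))
        else if PySem.List.pyGetD (PySem.List.pyGetD arr i []) j 0 = 2 then
          (false, st.2)
        else st)
      (false, deadlocks)).2) 0

-- ===== PORT B =====
def find_deadlocks_alt (N : Int) (arr : List (List Int)) : Int :=
  (PySem.List.pyRange 0 N 1).foldl (fun total j =>
    let col := (PySem.List.pyRange 0 N 1).filterMap (fun i =>
      if PySem.List.pyGetD (PySem.List.pyGetD arr i []) j 0 = 1 ∨
         PySem.List.pyGetD (PySem.List.pyGetD arr i []) j 0 = 2 then
        some (PySem.List.pyGetD (PySem.List.pyGetD arr i []) j 0)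
      else none)
    total + (((col.zip col.tail).countP (fun p => p.1 == 1 && p.2 == 1) : Nat) : Int)) 0

-- ===== PRECONDITION & SPEC =====
-- Pre_: exactly the inputs where Python A's arr[i][j] never raises IndexError:
-- N ≤ len(arr) and each of the first N rows has length ≥ N (trivial when N ≤ 0).
def Pre_find_deadlocks (N : Int) (arr : List (List Int)) : Prop :=
  N ≤ arr.length ∧ ∀ row ∈ arr.take N.toNat, N ≤ row.length

instance (N : Int) (arr : List (List Int)) : Decidable (Pre_find_deadlocks N arr) := by
  unfold Pre_find_deadlocks; infer_instance

def pvWitness_find_deadlocks : Int × List (List Int) := (2, [[1, 0], [1, 2]])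

def Spec_find_deadlocks (N : Int) (arr : List (List Int)) (out : Int) : Prop := out = find_deadlocks_alt N arr
instance (N : Int) (arr : List (List Int)) (out : Int) : Decidable (Spec_find_deadlocks N arr out) := by unfold Spec_find_deadlocks; infer_instance

-- ===== CLAIM (what is proved, stated in full; the proofs are below) =====
def Claim_equal_find_deadlocks : Prop := ∀ (N : Int) (arr : List (List Int)), Dom_find_deadlocks N arr → Pre_find_deadlocks N arr → Spec_find_deadlocks N arr (find_deadlocks N arr)

-- ===== LEMMAS AND PROOFS =====

-- adjacent (1,1)-pair count, exactly B's per-column expression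
def pcPairs (l : List Int) : Int :=
  (((l.zip l.tail).countP (fun p => p.1 == 1 && p.2 == 1) : Nat) : Int)

theorem pcPairs_cons_cons (a b : Int) (t : List Int) :
    pcPairs (a :: b :: t) = (if a = 1 ∧ b = 1 then 1 else 0) + pcPairs (b :: t) := by
  simp only [pcPairs, List.tail_cons, List.zip_cons_cons, List.countP_cons]
  by_cases h : a = 1 ∧ b = 1
  · simp [h]; push_cast; ring
  · have : ¬((a == 1 && b == 1) = true) := by
      simp only [Bool.and_eq_true, beq_iff_eq]; exact h
    simp [h, this]

theorem pcPairs_two_cons (l : List Int) : pcPairs (2 :: l) = pcPairs l := by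
  cases l with
  | nil => simp [pcPairs]
  | cons b t => rw [pcPairs_cons_cons]; norm_num

theorem loop_eq (val : Int → Int) (L : List Int) :
    ∀ (b : Bool) (d : Int),
    (L.foldl (fun (st : Bool × Int) i =>
        if val i = 1 then (if st.1 then (true, st.2 + 1) else (true, st.2))
        else if val i = 2 then (false, st.2)
        else st) (b, d)).2
    = d + pcPairs ((if b then (1 : Int) else 2) ::
        L.filterMap (fun i => if val i = 1 ∨ val i = 2 then some (val i) else none)) := by
  induction L with
  | nil => intro b d; simp [pcPairs]
  | cons x t ih =>
    intro b d
    simp only [List.foldl_cons, List.filterMap_cons]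
    by_cases h1 : val x = 1
    · cases b with
      | true => simp only [h1, if_true]; rw [ih]; simp [pcPairs_cons_cons]; ring
      | false => simp only [h1, if_true]; rw [ih]; simp [pcPairs_cons_cons]
    · by_cases h2 : val x = 2
      · rw [if_neg h1, if_pos h2, if_pos (Or.inr h2), h2, ih]
        cases b <;> simp [pcPairs_cons_cons]
      · rw [if_neg h1, if_neg h2,
            if_neg (by tauto : ¬(val x = 1 ∨ val x = 2)), ih]

theorem col_eq (arr : List (List Int)) (N d j : Int) :
    ((PySem.List.pyRange 0 N 1).foldl
      (fun (st : Bool × Int) i =>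
        if PySem.List.pyGetD (PySem.List.pyGetD arr i []) j 0 = 1 then
          (if st.1 then (true, st.2 + 1) else (true, st.2))
        else if PySem.List.pyGetD (PySem.List.pyGetD arr i []) j 0 = 2 then
          (false, st.2)
        else st)
      (false, d)).2
    = d + pcPairs ((PySem.List.pyRange 0 N 1).filterMap (fun i =>
        if PySem.List.pyGetD (PySem.List.pyGetD arr i []) j 0 = 1 ∨
           PySem.List.pyGetD (PySem.List.pyGetD arr i []) j 0 = 2 then
          some (PySem.List.pyGetD (PySem.List.pyGetD arr i []) j 0)
        else none)) := by
  have h := loop_eq (fun i => PySem.List.pyGetD (PySem.List.pyGetD arr i []) j 0)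
      (PySem.List.pyRange 0 N 1) false d
  simp only [Bool.false_eq_true, if_false] at h
  rw [h, pcPairs_two_cons]

-- ===== VERDICT (by name: the statement is the Claim_ definition above) =====
theorem find_deadlocks_spec : Claim_equal_find_deadlocks := by
  intro N arr _ _
  unfold Spec_find_deadlocks find_deadlocks find_deadlocks_alt
  apply List.foldl_ext
  intro d j _
  rw [col_eq]
  rfl
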